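-- pv_equiv track=rewrite | github.com/bioinfoUQAM/KEVOLVE | Matrix.py | generateMatrice
-- ===== SOURCE A (Python) =====
-- def generateMatrice(data, K_mers, k_min, k_max):
-- 	# Variables
-- 	X = []
-- 	y = []
--
-- 	# Generate K-mer dictionnary
-- 	X_dict = {}
-- 	for i, e in enumerate(K_mers):  X_dict[e] = 0;
--
-- 	# Generates X (matrix attributes)
-- 	for d in data:
-- 		x = []
-- 		x_dict =  X_dict.copy()
--
-- 		# For each k-mers length
-- 		for k in range(k_min, k_max + 1):
-- 			# Count K-mer occurences (with overlaping)
-- 			for i in range(0, len(d[1]) - k + 1, 1):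
-- 				try:
-- 					x_dict[d[1][i:i + k]] = x_dict[d[1][i:i + k]] + 1;
-- 				except: pass
--
-- 		# Get only occurences from dictionnary
-- 		for value in x_dict:
-- 			x.append(x_dict.get(value))
-- 		X.append(x)
--
-- 	# Generates y (Matrix class) if csv file exist
-- 	if len(data[0]) == 3:
-- 		for i in data: y.append(i[2])
-- 	# Return matrices X (matrix attributes)
-- 	return X, y
-- ===== SOURCE B (Python) =====
-- def _occurrences(s, km):
--     # overlapping occurrence count; the empty k-mer occurs at every boundary
--     if km == "":
--         return len(s) + 1
--     L = len(km)
--     return sum(1 for i in range(len(s) - L + 1) if s[i:i + L] == km)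
--
-- def generateMatrice(data, K_mers, k_min, k_max):
--     keys = list(dict.fromkeys(K_mers))
--     X = [[_occurrences(d[1], km) if k_min <= len(km) <= k_max else 0 for km in keys]
--          for d in data]
--     y = [d[2] for d in data] if len(data[0]) == 3 else []
--     return X, y
-- ===== Notes on version B (the rewrite author's own statement) =====
-- stated objective: simpler
-- what changed: A scans every slice d[1][i:i+k] for every k in [k_min,k_max] and increments a dict of k-mer counters under try/except; B drops the dict and the k-loop entirely and directly counts each deduplicated k-mer's overlapping occurrences in d[1] (gated by k_min <= len(kmer) <= k_max).
-- intended difference: When k_min < 0, Python's negative slice bound i+k wraps around, so A also counts length-(len(d[1])+k) substrings starting before index -k for each negative k and inflates the empty k-mer's count; B counts each k-mer's overlapping occurrences exactly when k_min <= len(kmer) <= k_max, which is the intended feature matrix. — e.g. on generateMatrice([["a", "GG"]], ["G"], -1, 1): A returns ([[3]], []), B returns ([[2]], [])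
import Mathlib
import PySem

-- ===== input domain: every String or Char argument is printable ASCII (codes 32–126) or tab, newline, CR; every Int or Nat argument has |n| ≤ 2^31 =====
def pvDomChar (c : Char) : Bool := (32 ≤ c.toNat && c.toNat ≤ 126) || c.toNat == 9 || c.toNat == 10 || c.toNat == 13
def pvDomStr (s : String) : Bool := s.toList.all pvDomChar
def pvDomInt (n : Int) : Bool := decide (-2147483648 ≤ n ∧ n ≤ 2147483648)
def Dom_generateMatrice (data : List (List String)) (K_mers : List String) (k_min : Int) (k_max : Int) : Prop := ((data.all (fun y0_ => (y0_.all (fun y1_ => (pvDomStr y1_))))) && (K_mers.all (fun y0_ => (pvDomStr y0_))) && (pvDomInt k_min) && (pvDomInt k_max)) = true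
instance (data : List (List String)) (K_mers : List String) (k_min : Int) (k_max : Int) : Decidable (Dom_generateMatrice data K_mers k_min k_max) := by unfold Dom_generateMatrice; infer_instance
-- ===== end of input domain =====

-- B replaces A's dict-of-every-substring scan (all k in [k_min,k_max], all slices, try/except)
-- by a direct per-k-mer overlapping-occurrence count over the deduplicated k-mer list; on
-- negative k_min B returns the intended counts where A's Python slice bound wraps around (see D_).

-- ===== PORT A =====
-- literal transliteration of A: build a dict of all K_mers set to 0; per row, scan every slice
-- d[1][i:i+k] for k in range(k_min, k_max+1) incrementing the entry when the key exists
-- (try/except swallows KeyError); read the row off the dict in key order.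
def generateMatrice (data : List (List String)) (K_mers : List String) (k_min : Int) (k_max : Int) :
    List (List Int) × List String :=
  let X_dict : PySem.Dict String Int :=
    (PySem.List.enumerate K_mers).foldl (fun d p => d.insert p.2 0) PySem.Dict.empty
  let X : List (List Int) :=
    data.foldl (fun X d =>
      let s : String := (PySem.List.pyGet? d 1).getD ""
      let x_dict : PySem.Dict String Int :=
        (PySem.List.pyRange k_min (k_max + 1)).foldl (fun xd k =>
          (PySem.List.pyRange 0 (PySem.Str.len s - k + 1)).foldl (fun xd i =>
            if xd.contains (PySem.Str.slice s (some i) (some (i + k))) then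
              xd.modify (PySem.Str.slice s (some i) (some (i + k))) 0 (· + 1)
            else xd) xd) X_dict
      let x : List Int :=
        x_dict.keys.foldl (fun x key => x ++ [(x_dict.get? key).getD 0]) []
      X ++ [x]) []
  let y : List String :=
    if ((PySem.List.pyGet? data 0).getD []).length == 3 then
      data.foldl (fun y i => y ++ [(PySem.List.pyGet? i 2).getD ""]) []
    else []
  (X, y)

-- ===== PORT B =====
-- overlapping occurrences of km in s; the empty k-mer occurs at every boundary (len+1 times)
def pvOccurrences (s : String) (km : String) : Int :=
  if km == "" then PySem.Str.len s + 1
  else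
    ((PySem.List.pyRange 0 (PySem.Str.len s - PySem.Str.len km + 1)).map
      (fun i => if PySem.Str.slice s (some i) (some (i + PySem.Str.len km)) == km then (1 : Int) else 0)).sum

def generateMatrice_alt (data : List (List String)) (K_mers : List String) (k_min : Int) (k_max : Int) :
    List (List Int) × List String :=
  let keys : List String := PySem.List.dedup K_mers
  let X : List (List Int) :=
    data.map (fun d =>
      keys.map (fun km =>
        if k_min ≤ PySem.Str.len km ∧ PySem.Str.len km ≤ k_max then
          pvOccurrences ((PySem.List.pyGet? d 1).getD "") km
        else 0))
  let y : List String :=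
    if ((PySem.List.pyGet? data 0).getD []).length == 3 then
      data.map (fun d => (PySem.List.pyGet? d 2).getD "")
    else []
  (X, y)

-- ===== PRECONDITION & SPEC =====
-- Pre_ is exactly the domain where Python A returns: data nonempty (data[0] is read), every row
-- has the sequence field d[1] whenever the k-range is nonempty, and every row has the class
-- field d[2] when the first row announces one (len(data[0]) == 3).
def Pre_generateMatrice (data : List (List String)) (K_mers : List String) (k_min : Int) (k_max : Int) : Prop :=
  data ≠ [] ∧ (k_min ≤ k_max → ∀ d ∈ data, 2 ≤ d.length) ∧
    ((data.headD []).length = 3 → ∀ d ∈ data, 3 ≤ d.length)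
instance (data : List (List String)) (K_mers : List String) (k_min : Int) (k_max : Int) : Decidable (Pre_generateMatrice data K_mers k_min k_max) := by unfold Pre_generateMatrice; infer_instance

def pvWitness_generateMatrice : List (List String) × List String × Int × Int :=
  ([["id", "ACGT", "c"]], ["AC"], 1, 2)

-- When k_min < 0, Python's negative slice bound i+k wraps around, so A additionally counts, for
-- each negative k, the length-(len(d[1])+k) substrings starting before index -k and inflates the
-- empty k-mer's count; B counts each k-mer's overlapping occurrences exactly when
-- k_min ≤ len(kmer) ≤ k_max, which is the intended feature matrix.
def D_generateMatrice (data : List (List String)) (K_mers : List String) (k_min : Int) (k_max : Int) : Prop :=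
  k_min < 0 ∧
    (("" ∈ K_mers ∧ k_min ≤ k_max ∧ data ≠ []) ∨
      ∃ d ∈ data, ∃ km ∈ K_mers, km ≠ "" ∧
        k_min ≤ PySem.Str.len km - PySem.Str.len (d.getD 1 "") ∧
        PySem.Str.len km - PySem.Str.len (d.getD 1 "") ≤ min k_max (-1) ∧
        km.toList <:+: (d.getD 1 "").toList.dropLast)
instance (data : List (List String)) (K_mers : List String) (k_min : Int) (k_max : Int) : Decidable (D_generateMatrice data K_mers k_min k_max) := by unfold D_generateMatrice; infer_instance

def Spec_generateMatrice (data : List (List String)) (K_mers : List String) (k_min : Int) (k_max : Int) (out : List (List Int) × List String) : Prop :=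
  ¬ D_generateMatrice data K_mers k_min k_max → out = generateMatrice_alt data K_mers k_min k_max
instance (data : List (List String)) (K_mers : List String) (k_min : Int) (k_max : Int) (out : List (List Int) × List String) : Decidable (Spec_generateMatrice data K_mers k_min k_max out) := by unfold Spec_generateMatrice; infer_instance

def pvDiffWitness_generateMatrice : List (List String) × List String × Int × Int :=
  ([["a", "GG"]], ["G"], -1, 1)

def pvDiffWitnessOut_generateMatrice : (List (List Int) × List String) × (List (List Int) × List String) :=
  (([[3]], []), ([[2]], []))

-- ===== CLAIM =====
def Claim_unchanged_generateMatrice : Prop := ∀ (data : List (List String)) (K_mers : List String) (k_min : Int) (k_max : Int), Dom_generateMatrice data K_mers k_min k_max → Pre_generateMatrice data K_mers k_min k_max → Spec_generateMatrice data K_mers k_min k_max (generateMatrice data K_mers k_min k_max)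

def Claim_changed_generateMatrice : Prop := Dom_generateMatrice (pvDiffWitness_generateMatrice.1) (pvDiffWitness_generateMatrice.2.1) (pvDiffWitness_generateMatrice.2.2.1) (pvDiffWitness_generateMatrice.2.2.2) ∧ Pre_generateMatrice (pvDiffWitness_generateMatrice.1) (pvDiffWitness_generateMatrice.2.1) (pvDiffWitness_generateMatrice.2.2.1) (pvDiffWitness_generateMatrice.2.2.2) ∧ D_generateMatrice (pvDiffWitness_generateMatrice.1) (pvDiffWitness_generateMatrice.2.1) (pvDiffWitness_generateMatrice.2.2.1) (pvDiffWitness_generateMatrice.2.2.2) ∧ generateMatrice (pvDiffWitness_generateMatrice.1) (pvDiffWitness_generateMatrice.2.1) (pvDiffWitness_generateMatrice.2.2.1) (pvDiffWitness_generateMatrice.2.2.2) = pvDiffWitnessOut_generateMatrice.1 ∧ generateMatrice_alt (pvDiffWitness_generateMatrice.1) (pvDiffWitness_generateMatrice.2.1) (pvDiffWitness_generateMatrice.2.2.1) (pvDiffWitness_generateMatrice.2.2.2) = pvDiffWitnessOut_generateMatrice.2 ∧ pvDiffWitnessOut_generateMatrice.1 ≠ pvDiffWitnessOut_generateMatrice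.2

-- ===== LEMMAS AND PROOFS =====

theorem pvGetD1 (d : List String) : d.getD 1 "" = (PySem.List.pyGet? d 1).getD "" := by
  have h : (1 : Int) = ((1 : Nat) : Int) := rfl
  rw [h, PySem.List.pyGet?_natCast, List.getD_eq_getElem?_getD]

def pvGstep (xd : PySem.Dict String Int) (sub : String) : PySem.Dict String Int :=
  if xd.contains sub then xd.modify sub 0 (· + 1) else xd

theorem pvGstep_keys (l : List String) (d : PySem.Dict String Int) :
    (l.foldl pvGstep d).keys = d.keys := by
  induction l generalizing d with
  | nil => rfl
  | cons x l ih =>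
    simp only [List.foldl_cons]
    rw [ih]
    unfold pvGstep
    by_cases h : d.contains x = true
    · simp [h, PySem.Dict.keys_modify, PySem.Dict.keys_insert_of_contains _ _ h]
    · simp [Bool.not_eq_true] at h
      simp [h]

theorem pvContains_congr {d d' : PySem.Dict String Int} (h : d.keys = d'.keys) (k : String) :
    d.contains k = d'.contains k := by
  cases hc : d'.contains k
  · cases hc2 : d.contains k
    · rfl
    · rw [PySem.Dict.contains_iff_mem_keys, h, ← PySem.Dict.contains_iff_mem_keys] at hc2
      rw [hc2] at hc; exact hc
  · rw [PySem.Dict.contains_iff_mem_keys] at hc ⊢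
    rw [h]; exact hc

theorem pvGstep_getD (l : List String) (d : PySem.Dict String Int) (k : String) :
    (l.foldl pvGstep d).getD k 0 =
      d.getD k 0 + (if d.contains k then (l.count k : Int) else 0) := by
  induction l generalizing d with
  | nil => simp
  | cons x l ih =>
    simp only [List.foldl_cons]
    rw [ih]
    have hkeys : (pvGstep d x).keys = d.keys := by
      have := pvGstep_keys [x] d; simpa using this
    rw [pvContains_congr hkeys k]
    unfold pvGstep
    by_cases hx : d.contains x = true
    · simp only [hx, if_true]
      by_cases hk : d.contains k = true
      · simp only [hk, if_true]
        by_cases hkx : k = x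
        · subst hkx
          rw [PySem.Dict.getD_modify_self]
          simp [List.count_cons]
          omega
        · rw [PySem.Dict.getD_modify_of_ne _ _ _ hkx]
          rw [List.count_cons_of_ne (by simpa using Ne.symm hkx)]
      · simp only [hk, Bool.false_eq_true, if_false]
        have hkx : k ≠ x := by rintro rfl; rw [hx] at hk; exact hk rfl
        rw [PySem.Dict.getD_modify_of_ne _ _ _ hkx]
    · simp only [Bool.not_eq_true] at hx
      simp only [hx, Bool.false_eq_true, if_false]
      by_cases hk : d.contains k = true
      · have hkx : k ≠ x := by rintro rfl; rw [hk] at hx; cases hx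
        simp only [hk, if_true]
        rw [List.count_cons_of_ne (by simpa using Ne.symm hkx)]
      · simp [hk]

theorem pvInsert0_getD (l : List String) (d : PySem.Dict String Int)
    (h : ∀ k, d.getD k 0 = 0) (k : String) :
    (l.foldl (fun dd e => dd.insert e 0) d).getD k 0 = 0 := by
  induction l generalizing d with
  | nil => exact h k
  | cons x l ih =>
    simp only [List.foldl_cons]
    refine ih _ (fun k' => ?_)
    by_cases hkx : k' = x
    · subst hkx; rw [PySem.Dict.getD_insert_self]
    · rw [PySem.Dict.getD_insert_of_ne _ _ _ hkx]; exact h k'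

theorem pvSum_single (K : List Int) (hnd : K.Nodup) (c : Int → Nat) (t : Int) (v : Nat)
    (h : ∀ k ∈ K, c k = if k = t then v else 0) :
    (K.map c).sum = if t ∈ K then v else 0 := by
  induction K with
  | nil => simp
  | cons a K ih =>
    simp only [List.map_cons, List.sum_cons]
    have hnd' := hnd.of_cons
    have ha := h a (List.mem_cons_self)
    by_cases hat : a = t
    · subst hat
      have hnotmem : a ∉ K := (List.nodup_cons.mp hnd).1
      have : (K.map c).sum = 0 := by
        rw [ih hnd' (fun k hk => h k (List.mem_cons_of_mem _ hk))]
        simp [hnotmem]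
      simp [ha, this]
    · rw [ih hnd' (fun k hk => h k (List.mem_cons_of_mem _ hk))]
      simp [ha, hat, List.mem_cons, Ne.symm hat]

theorem pvCnt_pos_ne (s km : String) (k : Int) (hk : 0 < k) (hne : k ≠ (km.toList.length : Int)) :
    ((PySem.List.pyRange 0 (PySem.Str.len s - k + 1)).map
      (fun i => PySem.Str.slice s (some i) (some (i + k)))).count km = 0 := by
  rw [List.count_eq_zero]
  intro hmem
  rw [List.mem_map] at hmem
  obtain ⟨i, hi, heq⟩ := hmem
  rw [PySem.List.mem_pyRange_one] at hi
  obtain ⟨h0, hlt⟩ := hi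
  simp only [PySem.Str.len] at hlt
  have ht := congrArg String.toList heq
  rw [PySem.Str.toList_slice, PySem.Chars.slice_eq_listSlice,
    PySem.List.slice_toNat _ h0 (by omega)] at ht
  have hlen := congrArg List.length ht
  simp only [List.length_take, List.length_drop] at hlen
  omega

theorem pvCnt_len (s km : String) :
    ((((PySem.List.pyRange 0 (PySem.Str.len s - (km.toList.length : Int) + 1)).map
      (fun i => PySem.Str.slice s (some i) (some (i + (km.toList.length : Int))))).count km : Nat) : Int)
    = ((PySem.List.pyRange 0 (PySem.Str.len s - PySem.Str.len km + 1)).map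
        (fun i => if PySem.Str.slice s (some i) (some (i + PySem.Str.len km)) == km then (1 : Int) else 0)).sum := by
  rw [PySem.List.sum_map_ite_one_zero
    (fun i => PySem.Str.slice s (some i) (some (i + PySem.Str.len km)) == km)]
  rw [List.count_eq_countP, List.countP_map]
  simp only [PySem.Str.len]
  rfl

theorem pvCnt_zero_empty (s : String) :
    ((PySem.List.pyRange 0 (PySem.Str.len s - 0 + 1)).map
      (fun i => PySem.Str.slice s (some i) (some (i + 0)))).count "" = s.toList.length + 1 := by
  rw [List.count_eq_countP, List.countP_map]
  have h1 : List.countP ((fun x => x == "") ∘ fun i => PySem.Str.slice s (some i) (some (i + 0)))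
      (PySem.List.pyRange 0 (PySem.Str.len s - 0 + 1))
      = (PySem.List.pyRange 0 (PySem.Str.len s - 0 + 1)).length := by
    rw [List.countP_eq_length]
    intro i _
    simp only [Function.comp, add_zero, beq_iff_eq]
    apply String.ext
    rw [PySem.Str.toList_slice, PySem.Chars.slice_eq_listSlice]
    simp [PySem.List.slice]
  rw [h1, PySem.List.length_pyRange_one]
  simp only [PySem.Str.len]
  omega

theorem pvCnt_neg (s km : String) (k k_min k_max : Int) (hk : k ≤ 0) (hkmin : k_min ≤ k) (hkmax : k ≤ k_max)
    (hne : km.toList ≠ [])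
    (hw : ¬(k_min ≤ (km.toList.length : Int) - (s.toList.length : Int) ∧
            (km.toList.length : Int) - (s.toList.length : Int) ≤ -1 ∧
            (km.toList.length : Int) - (s.toList.length : Int) ≤ k_max ∧
            km.toList <:+: s.toList.dropLast)) :
    ((PySem.List.pyRange 0 (PySem.Str.len s - k + 1)).map
      (fun i => PySem.Str.slice s (some i) (some (i + k)))).count km = 0 := by
  rw [List.count_eq_zero]
  intro hmem
  rw [List.mem_map] at hmem
  obtain ⟨i, hi, heq⟩ := hmem
  rw [PySem.List.mem_pyRange_one] at hi
  obtain ⟨h0, hlt⟩ := hi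
  apply hw
  have ht := congrArg String.toList heq
  rw [PySem.Str.toList_slice, PySem.Chars.slice_eq_listSlice] at ht
  simp only [PySem.List.slice] at ht
  set cs := s.toList with hcs
  set t := km.toList with hts
  set n := cs.length with hn
  set A := PySem.List.clampIdx n i with hA
  set B := PySem.List.clampIdx n (i + k) with hB
  have hL : 1 ≤ t.length := List.length_pos_iff.mpr hne
  have hlen := congrArg List.length ht
  simp only [List.length_take, List.length_drop] at hlen
  -- hlen : min (B - A) (n - A) = t.length
  have hBA : t.length ≤ B - A ∧ t.length ≤ n - A := by omega
  have hAv : A = min i.toNat n := by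
    rw [hA, PySem.List.clampIdx, if_neg (by omega)]
  have hik : i + k < 0 := by
    by_contra hge
    have hBv : B = min (i + k).toNat n := by
      rw [hB, PySem.List.clampIdx, if_neg (by omega)]
    omega
  have hBv : B = (↑n + (i + k)).toNat := by
    rw [hB, PySem.List.clampIdx, if_pos hik]
    split
    · omega
    · rfl
  have hnik : 0 ≤ ↑n + i + k := by
    by_contra hlt2
    have : B = 0 := by omega
    omega
  -- A = i.toNat, B = n+i+k, B ≤ n, B - A = t.length
  have hAi : A = i.toNat := by omega
  have hBn : B ≤ n := by omega
  have hBAeq : B - A = t.length := by omega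
  have hkeq : (t.length : Int) = ↑n + k := by omega
  refine ⟨by omega, by omega, by omega, ?_⟩
  -- infix
  have h2 : t = List.drop i.toNat (List.take (i.toNat + t.length) cs) := by
    rw [← List.take_drop, ← hBAeq, ← hAi, ht]
  have h3 : List.take (i.toNat + t.length) cs
      = List.take (i.toNat + t.length) (List.take (n - 1) cs) := by
    rw [List.take_take, Nat.min_eq_left (by omega)]
  rw [List.dropLast_eq_take, ← hn]
  rw [h2, h3]
  exact (List.drop_suffix _ _).isInfix.trans (List.take_prefix _ _).isInfix


theorem pvRow (s : String) (K_mers : List String) (k_min k_max : Int)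
    (hD1 : "" ∈ K_mers → k_min ≤ k_max → 0 ≤ k_min)
    (hD2 : ∀ km ∈ K_mers, km.toList ≠ [] →
      ¬(k_min ≤ (km.toList.length : Int) - (s.toList.length : Int) ∧
        (km.toList.length : Int) - (s.toList.length : Int) ≤ -1 ∧
        (km.toList.length : Int) - (s.toList.length : Int) ≤ k_max ∧
        km.toList <:+: s.toList.dropLast)) :
    (let x_dict :=
        (PySem.List.pyRange k_min (k_max + 1)).foldl (fun xd k =>
          (PySem.List.pyRange 0 (PySem.Str.len s - k + 1)).foldl (fun xd i =>
            if xd.contains (PySem.Str.slice s (some i) (some (i + k))) then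
              xd.modify (PySem.Str.slice s (some i) (some (i + k))) 0 (· + 1)
            else xd) xd)
          ((PySem.List.enumerate K_mers).foldl (fun d p => d.insert p.2 0) PySem.Dict.empty) ;
      x_dict.keys.foldl (fun x key => x ++ [(x_dict.get? key).getD 0]) [])
    = (PySem.List.dedup K_mers).map (fun km =>
        if k_min ≤ PySem.Str.len km ∧ PySem.Str.len km ≤ k_max then
          pvOccurrences s km
        else 0) := by
  dsimp only
  set dict0 : PySem.Dict String Int :=
    (PySem.List.enumerate K_mers).foldl (fun d p => d.insert p.2 0) PySem.Dict.empty with hdict0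
  set F : PySem.Dict String Int :=
    (PySem.List.pyRange k_min (k_max + 1)).foldl (fun xd k =>
      (PySem.List.pyRange 0 (PySem.Str.len s - k + 1)).foldl (fun xd i =>
        if xd.contains (PySem.Str.slice s (some i) (some (i + k))) then
          xd.modify (PySem.Str.slice s (some i) (some (i + k))) 0 (· + 1)
        else xd) xd) dict0 with hFdef
  have hd0plain : dict0 = K_mers.foldl (fun dd e => dd.insert e 0) PySem.Dict.empty := by
    rw [hdict0]
    conv_rhs => rw [← PySem.List.map_snd_enumerate K_mers 0]
    rw [List.foldl_map]
  have hkeys0 : dict0.keys = PySem.Set.ofList K_mers := by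
    rw [hd0plain, PySem.Dict.keys_foldl_insert]
    rw [PySem.Dict.keys_empty, PySem.Set.update_nil_left]
  have hgetD0 : ∀ k, dict0.getD k 0 = 0 := by
    intro k
    rw [hd0plain]
    exact pvInsert0_getD _ _ (fun k' => by
      rw [PySem.Dict.getD_of_not_contains _ _ (PySem.Dict.contains_empty _)]) k
  have hF : F = ((PySem.List.pyRange k_min (k_max + 1)).flatMap (fun k =>
      (PySem.List.pyRange 0 (PySem.Str.len s - k + 1)).map
        (fun i => PySem.Str.slice s (some i) (some (i + k))))).foldl pvGstep dict0 := by
    rw [hFdef, List.foldl_flatMap]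
    apply PySem.List.foldl_congr_mem
    intro acc k _
    rw [List.foldl_map]
    rfl
  have hkeysF : F.keys = PySem.Set.ofList K_mers := by
    rw [hF, pvGstep_keys, hkeys0]
  rw [PySem.List.foldl_append_singleton_eq_map (fun key => (F.get? key).getD 0) F.keys []]
  rw [List.nil_append, hkeysF, PySem.List.dedup_eq_ofList]
  apply List.map_congr_left
  intro km hkm
  have hkmm : km ∈ K_mers := (PySem.Set.mem_ofList _ _).mp hkm
  have hcont : dict0.contains km = true := by
    rw [PySem.Dict.contains_iff_mem_keys, hkeys0]; exact hkm
  have hgd : (F.get? km).getD 0 = F.getD km 0 := rfl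
  rw [hgd, hF, pvGstep_getD, hgetD0, hcont, if_pos rfl, zero_add, List.count_flatMap]
  -- now: sum over k of per-k counts = B entry
  by_cases hemp : km.toList = []
  · -- km = ""
    have hkme : km = "" := by simpa using hemp
    subst hkme
    by_cases hle : k_min ≤ k_max
    · have h0min : 0 ≤ k_min := hD1 hkmm hle
      rw [pvSum_single _ (PySem.List.nodup_pyRange_one _ _) _ 0 (s.toList.length + 1) ?side]
      case side =>
        intro k hk
        rw [PySem.List.mem_pyRange_one] at hk
        simp only [Function.comp]
        by_cases hk0 : k = 0
        · subst hk0
          rw [if_pos rfl]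
          exact pvCnt_zero_empty s
        · rw [if_neg hk0]
          exact pvCnt_pos_ne s "" k (by omega) (by simpa using hk0)
      by_cases hg : k_min ≤ PySem.Str.len "" ∧ PySem.Str.len "" ≤ k_max
      · rw [if_pos (by rw [PySem.List.mem_pyRange_one]; simp [PySem.Str.len] at hg ⊢; omega)]
        rw [if_pos hg]
        simp [pvOccurrences, PySem.Str.len]
      · rw [if_neg (by rw [PySem.List.mem_pyRange_one]; simp [PySem.Str.len] at hg ⊢; omega)]
        rw [if_neg hg]
        rfl
    · rw [PySem.List.pyRange_one_eq_nil (by omega)]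
      rw [if_neg (by simp only [PySem.Str.len]; simp; omega)]
      simp
  · -- km ≠ ""
    have hL : 1 ≤ km.toList.length := List.length_pos_iff.mpr hemp
    rw [pvSum_single _ (PySem.List.nodup_pyRange_one _ _) _ (km.toList.length : Int)
      (((PySem.List.pyRange 0 (PySem.Str.len s - (km.toList.length : Int) + 1)).map
        (fun i => PySem.Str.slice s (some i) (some (i + (km.toList.length : Int))))).count km) ?side2]
    case side2 =>
      intro k hk
      rw [PySem.List.mem_pyRange_one] at hk
      simp only [Function.comp]
      by_cases hkL : k = (km.toList.length : Int)
      · subst hkL; rw [if_pos rfl]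
      · rw [if_neg hkL]
        by_cases hkpos : 0 < k
        · exact pvCnt_pos_ne s km k hkpos hkL
        · exact pvCnt_neg s km k k_min k_max (by omega) (by omega) (by omega) hemp
            (hD2 km hkmm hemp)
    by_cases hg : k_min ≤ PySem.Str.len km ∧ PySem.Str.len km ≤ k_max
    · rw [if_pos (by rw [PySem.List.mem_pyRange_one]; simp only [PySem.Str.len] at hg; omega)]
      rw [if_pos hg]
      rw [pvOccurrences, if_neg (by simp; intro h; exact hemp (by simp [h]))]
      exact pvCnt_len s km
    · rw [if_neg (by rw [PySem.List.mem_pyRange_one]; simp only [PySem.Str.len] at hg; omega)]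
      rw [if_neg hg]
      rfl


-- ===== VERDICT =====
theorem generateMatrice_spec : Claim_unchanged_generateMatrice := by
  intro data K_mers k_min k_max _ hpre
  unfold Spec_generateMatrice
  intro hND
  unfold D_generateMatrice at hND
  unfold generateMatrice generateMatrice_alt
  dsimp only
  rw [Prod.mk.injEq]
  constructor
  · rw [PySem.List.foldl_append_singleton_eq_map]
    rw [List.nil_append]
    apply List.map_congr_left
    intro d hd
    have hd1 : "" ∈ K_mers → k_min ≤ k_max → 0 ≤ k_min := by
      intro hm hle
      by_contra hneg
      exact hND ⟨by omega, Or.inl ⟨hm, hle, List.ne_nil_of_mem hd⟩⟩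
    have hd2 : ∀ km ∈ K_mers, km.toList ≠ [] →
        ¬(k_min ≤ (km.toList.length : Int) - ((((PySem.List.pyGet? d 1).getD "")).toList.length : Int) ∧
          (km.toList.length : Int) - ((((PySem.List.pyGet? d 1).getD "")).toList.length : Int) ≤ -1 ∧
          (km.toList.length : Int) - ((((PySem.List.pyGet? d 1).getD "")).toList.length : Int) ≤ k_max ∧
          km.toList <:+: (((PySem.List.pyGet? d 1).getD "")).toList.dropLast) := by
      intro km hkm hne hcon
      obtain ⟨h1, h2, h3, h4⟩ := hcon
      have hs : d.getD 1 "" = (PySem.List.pyGet? d 1).getD "" := pvGetD1 d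
      refine hND ⟨by omega, Or.inr ⟨d, hd, km, hkm, fun h => hne (by simp [h]), ?_, ?_, ?_⟩⟩
      · simp only [PySem.Str.len, hs]; omega
      · simp only [PySem.Str.len, hs]; omega
      · rw [hs]; exact h4
    have h := pvRow ((PySem.List.pyGet? d 1).getD "") K_mers k_min k_max hd1 hd2
    dsimp only at h
    exact h
  · split_ifs with h
    · rw [PySem.List.foldl_append_singleton_eq_map]
      rw [List.nil_append]
    · rfl

theorem generateMatrice_changed : Claim_changed_generateMatrice := by
  unfold Claim_changed_generateMatrice; decide
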